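-- pv_equiv track=rewrite | github.com/MXYLR/Full-Speed-Python-Exercises-Answer | generator.py | getEven
-- ===== SOURCE A (Python) =====
-- def getEven(n):
--     i=1#辅助变量
--     while i<=n:
--         if i%2==0:
--             yield i
--             i+=1
--         else:
--             i+=1
-- ===== SOURCE B (Python) =====
-- def getEven(n):
--     yield from range(2, n + 1, 2)
-- ===== Notes on version B (the rewrite author's own statement) =====
-- stated objective: idiomatic
-- what changed: B yields the evens directly with range(2, n+1, 2), stepping by two, instead of scanning every integer from 1 to n and filtering with i%2==0.
import Mathlib
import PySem

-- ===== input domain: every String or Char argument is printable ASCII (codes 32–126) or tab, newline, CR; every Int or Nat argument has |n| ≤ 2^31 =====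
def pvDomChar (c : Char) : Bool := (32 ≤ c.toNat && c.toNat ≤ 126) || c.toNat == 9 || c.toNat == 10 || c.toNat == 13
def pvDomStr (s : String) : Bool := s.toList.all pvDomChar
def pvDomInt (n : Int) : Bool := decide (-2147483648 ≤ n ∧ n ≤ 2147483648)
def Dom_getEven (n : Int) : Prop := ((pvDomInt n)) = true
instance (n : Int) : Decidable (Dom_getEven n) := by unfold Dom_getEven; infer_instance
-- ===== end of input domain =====

-- B replaces A's scan-all-integers-and-filter loop by range(2, n+1, 2), stepping directly over the evens (idiomatic).

-- ===== PORT A =====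
-- while i<=n: if i%2==0: yield i; i+=1 else: i+=1
def getEvenAux (n i : Int) : List Int :=
  if i ≤ n then
    (if i % 2 == 0 then [i] else []) ++ getEvenAux n (i + 1)
  else []
termination_by (n + 1 - i).toNat
decreasing_by omega

def getEven (n : Int) : List Int := getEvenAux n 1

-- ===== PORT B =====
def getEven_alt (n : Int) : List Int := PySem.List.pyRange 2 (n + 1) 2

-- ===== PRECONDITION & SPEC =====
def Spec_getEven (n : Int) (out : List Int) : Prop := out = getEven_alt n
instance (n : Int) (out : List Int) : Decidable (Spec_getEven n out) := by unfold Spec_getEven; infer_instance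

-- ===== CLAIM (what is proved, stated in full; the proofs are below) =====
def Claim_equal_getEven : Prop := ∀ (n : Int), Dom_getEven n → Spec_getEven n (getEven n)

-- ===== LEMMAS AND PROOFS =====
theorem pyRange_two_nil (a b : Int) (h : b ≤ a) : PySem.List.pyRange a b 2 = [] := by
  rw [PySem.List.pyRange_of_pos a b (by norm_num)]
  rw [if_neg (by omega)]
  simp

theorem pyRange_two_cons (a b : Int) (h : a < b) :
    PySem.List.pyRange a b 2 = a :: PySem.List.pyRange (a + 2) b 2 := by
  rw [PySem.List.pyRange_of_pos a b (by norm_num),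
      PySem.List.pyRange_of_pos (a + 2) b (by norm_num)]
  have hc : (if a < b then ((b - a + 2 - 1) / 2).toNat else 0)
      = (if a + 2 < b then ((b - (a + 2) + 2 - 1) / 2).toNat else 0) + 1 := by
    split_ifs <;> omega
  rw [hc, List.range_succ_eq_map]
  simp only [List.map_cons, List.map_map]
  congr 1
  · push_cast; ring
  · apply List.map_congr_left
    intro k _
    simp only [Function.comp_apply, Nat.succ_eq_add_one]
    push_cast
    ring

theorem getEvenAux_eq (n i : Int) :
    getEvenAux n i = PySem.List.pyRange (if i % 2 = 0 then i else i + 1) (n + 1) 2 := by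
  by_cases h : i ≤ n
  · rw [getEvenAux]
    rw [if_pos h]
    have ih := getEvenAux_eq n (i + 1)
    by_cases he : i % 2 = 0
    · have h2 : ¬ (i + 1) % 2 = 0 := by omega
      rw [if_pos he] at *
      rw [if_neg h2] at ih
      simp only [he, beq_self_eq_true, if_true]
      have h12 : i + 1 + 1 = i + 2 := by ring
      rw [ih, h12, pyRange_two_cons i (n + 1) (by omega)]
      simp
    · have h2 : (i + 1) % 2 = 0 := by omega
      rw [if_neg he]
      rw [if_pos h2] at ih
      have : (i % 2 == 0) = false := by simp [he]
      rw [this]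
      simpa using ih
  · rw [getEvenAux, if_neg h]
    rw [pyRange_two_nil _ _ (by split_ifs <;> omega)]
termination_by (n + 1 - i).toNat
decreasing_by omega

-- ===== VERDICT (by name: the statement is the Claim_ definition above) =====
theorem getEven_spec : Claim_equal_getEven := by
  intro n _
  unfold Spec_getEven getEven getEven_alt
  rw [getEvenAux_eq]
  norm_num
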